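-- pv_equiv track=rewrite | github.com/Jerempire/gym-anything | benchmarks/cua_world/environments/oracle_sql_developer_env/tasks/write_analytical_query/verifier.py | check_ordering
-- ===== SOURCE A (Python) =====
-- def check_ordering(rows):
--     if not rows:
--         return False
--     is_ordered = True
--     prev_dept = None
--     prev_rank = -1
--     for r in rows:
--         dept = r.get('DEPARTMENT_NAME', '').strip().upper()
--         try:
--             rank = int(r.get('DEPT_SALARY_RANK', '').strip())
--         except ValueError:
--             continue
--
--         if prev_dept is not None:
--             if dept < prev_dept:
--                 is_ordered = False
--                 break
--             elif dept == prev_dept: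
--                 if rank < prev_rank:
--                     is_ordered = False
--                     break
--         prev_dept = dept
--         prev_rank = rank
--     return is_ordered
-- ===== SOURCE B (Python) =====
-- def check_ordering(rows):
--     if not rows:
--         return False
--     keys = []
--     for r in rows:
--         dept = r.get('DEPARTMENT_NAME', '').strip().upper()
--         try:
--             rank = int(r.get('DEPT_SALARY_RANK', '').strip())
--         except ValueError:
--             continue
--         keys.append((dept, rank))
--     return keys == sorted(keys)
-- ===== Notes on version B (the rewrite author's own statement) =====
-- stated objective: idiomatic
-- what changed: Replaces the single-pass previous-row state machine with early break by collecting the (dept, rank) keys and comparing the list with its sorted copy, letting tuple comparison encode dept-then-rank order.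
import Mathlib
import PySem

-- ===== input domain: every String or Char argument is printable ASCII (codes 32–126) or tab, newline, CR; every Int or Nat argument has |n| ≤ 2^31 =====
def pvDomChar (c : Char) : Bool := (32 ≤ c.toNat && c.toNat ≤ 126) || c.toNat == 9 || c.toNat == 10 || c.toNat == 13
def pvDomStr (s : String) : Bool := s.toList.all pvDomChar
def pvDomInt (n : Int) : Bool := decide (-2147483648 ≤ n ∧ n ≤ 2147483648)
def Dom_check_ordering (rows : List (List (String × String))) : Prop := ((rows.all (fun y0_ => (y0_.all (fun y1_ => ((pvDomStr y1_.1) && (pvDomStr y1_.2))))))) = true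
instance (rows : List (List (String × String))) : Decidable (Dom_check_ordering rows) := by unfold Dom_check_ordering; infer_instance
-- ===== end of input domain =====

-- B replaces A's single-pass previous-row state machine by "collect the (dept, rank) keys, then
-- compare the list with its sorted copy" (more idiomatic, not faster).

-- ===== PORT A =====
-- shared field extraction: r.get(k, '') on the dict, then .strip().upper() / int(….strip())
def pvField (r : List (String × String)) (k : String) : String :=
  (PySem.Dict.ofList r).getD k ""

def pvDept (r : List (String × String)) : String :=
  PySem.Str.upper (PySem.Str.strip (pvField r "DEPARTMENT_NAME"))

def pvRank? (r : List (String × String)) : Option Int :=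
  PySem.Int.ofStr? (PySem.Str.strip (pvField r "DEPT_SALARY_RANK"))

-- A's loop: prev_dept (None initially) and prev_rank; `continue` on ValueError; break = return False
def pvLoopA : List (List (String × String)) → Option String → Int → Bool
  | [], _, _ => true
  | r :: rest, prevDept, prevRank =>
    let dept := pvDept r
    match pvRank? r with
    | none => pvLoopA rest prevDept prevRank
    | some rank =>
      match prevDept with
      | some pd =>
        if dept < pd then false
        else if dept = pd then
          if rank < prevRank then false
          else pvLoopA rest (some dept) rank
        else pvLoopA rest (some dept) rank
      | none => pvLoopA rest (some dept) rank

def check_ordering (rows : List (List (String × String))) : Bool :=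
  if rows = [] then false else pvLoopA rows none (-1)

-- ===== PORT B =====
-- keys built by appending, as Source B's loop does
def pvKeysB (rows : List (List (String × String))) : List (String × Int) :=
  rows.foldl (fun acc r =>
    let dept := pvDept r
    match pvRank? r with
    | none => acc
    | some rank => acc ++ [(dept, rank)]) []

def check_ordering_alt (rows : List (List (String × String))) : Bool :=
  if rows = [] then false
  else decide (pvKeysB rows = PySem.List.sorted2 (pvKeysB rows) (fun p => p.1) (fun p => p.2) false)

-- ===== PRECONDITION & SPEC =====
def Spec_check_ordering (rows : List (List (String × String))) (out : Bool) : Prop := out = check_ordering_alt rows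
instance (rows : List (List (String × String))) (out : Bool) : Decidable (Spec_check_ordering rows out) := by unfold Spec_check_ordering; infer_instance

-- ===== CLAIM (what is proved, stated in full; the proofs are below) =====
def Claim_equal_check_ordering : Prop := ∀ (rows : List (List (String × String))), Dom_check_ordering rows → Spec_check_ordering rows (check_ordering rows)

-- ===== LEMMAS AND PROOFS =====

-- the dept-then-rank ordering A's comparisons encode
def pvLexLe (a b : String × Int) : Prop := a.1 < b.1 ∨ (a.1 = b.1 ∧ a.2 ≤ b.2)

theorem pvLexLe_trans : ∀ {a b c : String × Int}, pvLexLe a b → pvLexLe b c → pvLexLe a c := by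
  intro a b c hab hbc
  unfold pvLexLe at *
  rcases hab with h | ⟨e, h2⟩ <;> rcases hbc with h' | ⟨e', h2'⟩
  · exact Or.inl (lt_trans h h')
  · exact Or.inl (lt_of_lt_of_le h (le_of_eq e'))
  · exact Or.inl (lt_of_le_of_lt (le_of_eq e) h')
  · exact Or.inr ⟨e.trans e', le_trans h2 h2'⟩

-- the keys both programs extract (B appends them, A consumes them one by one)
def pvKeys (rows : List (List (String × String))) : List (String × Int) :=
  rows.filterMap (fun r => (pvRank? r).map (fun k => (pvDept r, k)))

theorem pvKeys_cons_none {r : List (String × String)} (rest : List (List (String × String)))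
    (h : pvRank? r = none) : pvKeys (r :: rest) = pvKeys rest := by
  simp [pvKeys, h]

theorem pvKeys_cons_some {r : List (String × String)} (rest : List (List (String × String)))
    {k : Int} (h : pvRank? r = some k) : pvKeys (r :: rest) = (pvDept r, k) :: pvKeys rest := by
  simp [pvKeys, h]

theorem pvKeysB_foldl (rows : List (List (String × String))) :
    ∀ acc : List (String × Int),
      rows.foldl (fun acc r =>
        let dept := pvDept r
        match pvRank? r with
        | none => acc
        | some rank => acc ++ [(dept, rank)]) acc = acc ++ pvKeys rows := by
  induction rows with
  | nil => intro acc; simp [pvKeys]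
  | cons r rest ih =>
    intro acc
    simp only [List.foldl_cons]
    cases h : pvRank? r with
    | none => rw [pvKeys_cons_none rest h]; simpa [h] using ih acc
    | some rank =>
      rw [pvKeys_cons_some rest h]
      simpa [h] using ih (acc ++ [(pvDept r, rank)])

theorem pvKeysB_eq (rows : List (List (String × String))) : pvKeysB rows = pvKeys rows := by
  simpa using pvKeysB_foldl rows []

-- the Boolean "before" relation sorted2 uses (tuple key = (fst, snd), reverse = false)
def pvBefore (a b : String × Int) : Bool :=
  decide (a.1 < b.1) || (!decide (b.1 < a.1) && decide (a.2 < b.2))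

theorem pvSorted2_eq (xs : List (String × Int)) :
    PySem.List.sorted2 xs (fun p => p.1) (fun p => p.2) false =
      xs.foldl (fun acc x => PySem.List.insertBy pvBefore x acc) [] := rfl

theorem pvBefore_true_iff (x y : String × Int) :
    pvBefore x y = true ↔ (x.1 < y.1 ∨ (x.1 = y.1 ∧ x.2 < y.2)) := by
  unfold pvBefore
  rcases lt_trichotomy x.1 y.1 with h | h | h
  · simp [h]
  · simp [h]
  · simp [lt_asymm h, h, ne_of_gt h]

theorem pvBefore_false_iff (x y : String × Int) : pvBefore x y = false ↔ pvLexLe y x := by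
  rw [← Bool.not_eq_true, pvBefore_true_iff]
  unfold pvLexLe
  constructor
  · intro h
    push Not at h
    rcases lt_trichotomy y.1 x.1 with h' | h' | h'
    · exact Or.inl h'
    · exact Or.inr ⟨h', h.2 h'.symm⟩
    · exact absurd h' h.1
  · rintro (h | ⟨e, h2⟩)
    · rintro (h' | ⟨e', h2'⟩)
      · exact lt_asymm h h'
      · exact absurd (e' ▸ h) (lt_irrefl _)
    · rintro (h' | ⟨e', h2'⟩)
      · exact absurd (e ▸ h') (lt_irrefl _)
      · omega

theorem pvBefore_true_le {x y : String × Int} (h : pvBefore x y = true) : pvLexLe x y := by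
  rcases (pvBefore_true_iff x y).mp h with h' | ⟨e, h2⟩
  · exact Or.inl h'
  · exact Or.inr ⟨e, le_of_lt h2⟩

theorem pvInsertBy_pairwise {x : String × Int} {ys : List (String × Int)}
    (h : ys.Pairwise pvLexLe) : (PySem.List.insertBy pvBefore x ys).Pairwise pvLexLe := by
  induction ys with
  | nil => simp [PySem.List.insertBy]
  | cons y ys ih =>
    rw [List.pairwise_cons] at h
    obtain ⟨hy, hys⟩ := h
    by_cases hb : pvBefore x y = true
    · have hxy := pvBefore_true_le hb
      simp only [PySem.List.insertBy, hb, if_true]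
      refine List.Pairwise.cons ?_ (List.Pairwise.cons hy hys)
      intro z hz
      rcases List.mem_cons.mp hz with rfl | hz'
      · exact hxy
      · exact pvLexLe_trans hxy (hy z hz')
    · have hyx : pvLexLe y x := (pvBefore_false_iff x y).mp (Bool.not_eq_true _ ▸ hb)
      simp only [PySem.List.insertBy, hb]
      rw [if_neg (by simpa using hb)]
      refine List.Pairwise.cons ?_ (ih hys)
      intro z hz
      rcases (PySem.List.mem_insertBy pvBefore x z ys).mp hz with rfl | hz
      · exact hyx
      · exact hy z hz

theorem pvFoldl_insertBy_pairwise (xs : List (String × Int)) :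
    ∀ acc : List (String × Int), acc.Pairwise pvLexLe →
      (xs.foldl (fun acc x => PySem.List.insertBy pvBefore x acc) acc).Pairwise pvLexLe := by
  induction xs with
  | nil => intro acc h; simpa using h
  | cons x xs ih => intro acc h; exact ih _ (pvInsertBy_pairwise h)

theorem pvFoldl_insertBy_of_pairwise (xs : List (String × Int)) :
    ∀ acc : List (String × Int), (acc ++ xs).Pairwise pvLexLe →
      xs.foldl (fun acc x => PySem.List.insertBy pvBefore x acc) acc = acc ++ xs := by
  induction xs with
  | nil => intro acc _; simp
  | cons x xs ih =>
    intro acc h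
    have hle : ∀ y ∈ acc, pvBefore x y = false := by
      intro y hy
      exact (pvBefore_false_iff x y).mpr ((List.pairwise_append.mp h).2.2 y hy x (by simp))
    simp only [List.foldl_cons, PySem.List.insertBy_of_forall_not_before pvBefore x acc hle]
    have h' : ((acc ++ [x]) ++ xs).Pairwise pvLexLe := by simpa using h
    simpa using ih (acc ++ [x]) h'

theorem pvSorted2_eq_self_iff (xs : List (String × Int)) :
    xs = PySem.List.sorted2 xs (fun p => p.1) (fun p => p.2) false ↔ xs.Pairwise pvLexLe := by
  rw [pvSorted2_eq]
  constructor
  · intro h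
    rw [h]
    exact pvFoldl_insertBy_pairwise xs [] (by simp)
  · intro h
    rw [pvFoldl_insertBy_of_pairwise xs [] (by simpa using h)]
    simp

set_option maxHeartbeats 1600000 in
theorem pvLoopA_some (rows : List (List (String × String))) :
    ∀ (pd : String) (pr : Int),
      pvLoopA rows (some pd) pr = true ↔ List.IsChain pvLexLe ((pd, pr) :: pvKeys rows) := by
  induction rows with
  | nil => intro pd pr; simp [pvLoopA, pvKeys]
  | cons r rest ih =>
    intro pd pr
    cases h : pvRank? r with
    | none =>
      rw [pvKeys_cons_none rest h]
      simpa [pvLoopA, h] using ih pd pr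
    | some rank =>
      rw [pvKeys_cons_some rest h, List.isChain_cons_cons]
      simp only [pvLoopA, h]
      rcases lt_trichotomy (pvDept r) pd with h1 | h1 | h1
      · rw [if_pos h1]
        simp only [Bool.false_eq_true, false_iff]
        rintro ⟨hle, -⟩
        rcases hle with h' | ⟨e, -⟩
        · exact absurd h1 (lt_asymm h')
        · have e' : pd = pvDept r := e
          rw [e'] at h1
          exact absurd h1 (lt_irrefl _)
      · have e : pvDept r = pd := h1
        rw [if_neg (by rw [e]; exact lt_irrefl _), if_pos e]
        by_cases h3 : rank < pr
        · rw [if_pos h3]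
          simp only [Bool.false_eq_true, false_iff]
          rintro ⟨hle, -⟩
          rcases hle with h' | ⟨-, h2⟩
          · have e' : pd < pvDept r := h'
            rw [e] at e'
            exact absurd e' (lt_irrefl _)
          · exact absurd h3 (by omega)
        · rw [if_neg h3, ih (pvDept r) rank]
          have hle : pvLexLe (pd, pr) (pvDept r, rank) := Or.inr ⟨e.symm, by omega⟩
          exact ⟨fun hc => ⟨hle, hc⟩, fun hc => hc.2⟩
      · rw [if_neg (lt_asymm h1), if_neg (ne_of_gt h1), ih (pvDept r) rank]
        have hle : pvLexLe (pd, pr) (pvDept r, rank) := Or.inl h1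
        exact ⟨fun hc => ⟨hle, hc⟩, fun hc => hc.2⟩

theorem pvLoopA_none (rows : List (List (String × String))) (pr : Int) :
    pvLoopA rows none pr = true ↔ List.IsChain pvLexLe (pvKeys rows) := by
  induction rows with
  | nil => simp [pvLoopA, pvKeys]
  | cons r rest ih =>
    cases h : pvRank? r with
    | none =>
      rw [pvKeys_cons_none rest h]
      simpa [pvLoopA, h] using ih
    | some rank =>
      rw [pvKeys_cons_some rest h]
      simp only [pvLoopA, h]
      exact pvLoopA_some rest (pvDept r) rank

theorem pvChain_iff_pairwise (xs : List (String × Int)) :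
    List.IsChain pvLexLe xs ↔ xs.Pairwise pvLexLe :=
  @List.isChain_iff_pairwise _ _ _ ⟨fun h h' => pvLexLe_trans h h'⟩

-- ===== VERDICT (by name: the statement is the Claim_ definition above) =====
theorem check_ordering_spec : Claim_equal_check_ordering := by
  intro rows _
  unfold Spec_check_ordering check_ordering check_ordering_alt
  by_cases hnil : rows = []
  · simp [hnil]
  · simp only [hnil, if_false]
    have hA : pvLoopA rows none (-1) = true ↔ List.IsChain pvLexLe (pvKeys rows) :=
      pvLoopA_none rows (-1)
    have hB : (pvKeysB rows = PySem.List.sorted2 (pvKeysB rows) (fun p => p.1) (fun p => p.2) false)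
        ↔ (pvKeys rows).Pairwise pvLexLe := by
      rw [pvKeysB_eq]; exact pvSorted2_eq_self_iff (pvKeys rows)
    rw [Bool.eq_iff_iff]
    simp only [decide_eq_true_eq, hA, hB, pvChain_iff_pairwise]
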